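-- pv_equiv track=rewrite | github.com/paulklemstine/factor | lean/demo/New/AlgebraicFactoring/demo_experiments.py | four_squares
-- ===== SOURCE A (Python) =====
-- import math
--
-- def four_squares(n):
--     """Find n = a² + b² + c² + d²."""
--     if n < 0: return None
--     isqrt_n = int(math.isqrt(n))
--     for a in range(isqrt_n, -1, -1):
--         r1 = n - a*a
--         if r1 < 0: continue
--         for b in range(min(a, int(math.isqrt(r1))), -1, -1):
--             r2 = r1 - b*b
--             if r2 < 0: continue
--             for c in range(min(b, int(math.isqrt(r2))), -1, -1):
--                 r3 = r2 - c*c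
--                 if r3 < 0: continue
--                 d = int(math.isqrt(r3))
--                 if d*d == r3:
--                     return (a, b, c, d)
--     return None
-- ===== SOURCE B (Python) =====
-- import math
--
-- def four_squares(n):
--     """Find n = a² + b² + c² + d²."""
--     if n < 0:
--         return None
--
--     def search(k, remaining, upper):
--         # lexicographically-maximal k squares summing to `remaining`,
--         # first term bounded by `upper` (last term unbounded, as in A)
--         if k == 1:
--             d = math.isqrt(remaining)
--             return (d,) if d * d == remaining else None
--         for i in range(min(upper, math.isqrt(remaining)), -1, -1):
--             rest = search(k - 1, remaining - i * i, i)
--             if rest is not None: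
--                 return (i,) + rest
--         return None
--
--     return search(4, n, math.isqrt(n))
-- ===== Notes on version B (the rewrite author's own statement) =====
-- stated objective: simpler
-- what changed: Replaces A's three hard-coded nested loops by one uniform recursive helper search(k, remaining, upper) that handles all levels of the backtracking with a single loop body.
import Mathlib
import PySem

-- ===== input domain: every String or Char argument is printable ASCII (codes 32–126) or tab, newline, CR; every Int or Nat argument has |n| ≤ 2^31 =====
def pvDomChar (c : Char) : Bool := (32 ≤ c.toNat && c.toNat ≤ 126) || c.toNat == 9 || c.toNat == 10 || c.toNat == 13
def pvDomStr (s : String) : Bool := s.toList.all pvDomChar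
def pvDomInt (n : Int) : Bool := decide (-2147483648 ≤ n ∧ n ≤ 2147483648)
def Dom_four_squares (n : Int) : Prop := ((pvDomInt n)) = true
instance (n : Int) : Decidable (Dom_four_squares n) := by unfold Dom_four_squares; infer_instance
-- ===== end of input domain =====

-- B replaces A's three hard-coded nested loops by one uniform recursive search(k, remaining, upper); objective: simpler.

-- math.isqrt(x): exact for 0 ≤ x (the only way either program calls it; math.isqrt raises on x < 0)
def pyIsqrt (x : Int) : Int := ((Nat.sqrt x.toNat : Nat) : Int)

-- ===== PORT A =====
-- innermost loop: `for c in range(c0, -1, -1)`; the loop index c counts down, d = isqrt(r3)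
def loopC (r2 : Int) : Nat → Option (Int × Int)
  | 0 =>
      if r2 - 0 * 0 < 0 then none
      else if pyIsqrt (r2 - 0 * 0) * pyIsqrt (r2 - 0 * 0) = r2 - 0 * 0 then
        some (0, pyIsqrt (r2 - 0 * 0))
      else none
  | c + 1 =>
      if r2 - ((c : Int) + 1) * ((c : Int) + 1) < 0 then loopC r2 c
      else if pyIsqrt (r2 - ((c : Int) + 1) * ((c : Int) + 1)) * pyIsqrt (r2 - ((c : Int) + 1) * ((c : Int) + 1)) = r2 - ((c : Int) + 1) * ((c : Int) + 1) then
        some ((c : Int) + 1, pyIsqrt (r2 - ((c : Int) + 1) * ((c : Int) + 1)))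
      else loopC r2 c

-- middle loop: `for b in range(min(a, isqrt(r1)), -1, -1)` with r2 = r1 - b*b
def loopB (r1 : Int) : Nat → Option (Int × Int × Int)
  | 0 =>
      if r1 - 0 * 0 < 0 then none
      else
        match loopC (r1 - 0 * 0) (min (0 : Int) (pyIsqrt (r1 - 0 * 0))).toNat with
        | some (c, d) => some (0, c, d)
        | none => none
  | b + 1 =>
      if r1 - ((b : Int) + 1) * ((b : Int) + 1) < 0 then loopB r1 b
      else
        match loopC (r1 - ((b : Int) + 1) * ((b : Int) + 1)) (min ((b : Int) + 1) (pyIsqrt (r1 - ((b : Int) + 1) * ((b : Int) + 1)))).toNat with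
        | some (c, d) => some ((b : Int) + 1, c, d)
        | none => loopB r1 b

-- outer loop: `for a in range(isqrt_n, -1, -1)` with r1 = n - a*a
def loopA (n : Int) : Nat → Option (Int × Int × Int × Int)
  | 0 =>
      if n - 0 * 0 < 0 then none
      else
        match loopB (n - 0 * 0) (min (0 : Int) (pyIsqrt (n - 0 * 0))).toNat with
        | some (b, c, d) => some (0, b, c, d)
        | none => none
  | a + 1 =>
      if n - ((a : Int) + 1) * ((a : Int) + 1) < 0 then loopA n a
      else
        match loopB (n - ((a : Int) + 1) * ((a : Int) + 1)) (min ((a : Int) + 1) (pyIsqrt (n - ((a : Int) + 1) * ((a : Int) + 1)))).toNat with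
        | some (b, c, d) => some ((a : Int) + 1, b, c, d)
        | none => loopA n a

def four_squares (n : Int) : Option (Int × Int × Int × Int) :=
  if n < 0 then none
  else loopA n (pyIsqrt n).toNat

-- ===== PORT B =====
-- search k remaining upper, and its downward loop `for i in range(m, -1, -1)` as searchFrom
mutual
  def search : Nat → Int → Int → Option (List Int)
    | 0, _, _ => none            -- unreachable: search is only called with k ≥ 1
    | 1, remaining, _ =>
        if pyIsqrt remaining * pyIsqrt remaining = remaining then some [pyIsqrt remaining]
        else none
    | k + 2, remaining, upper =>
        searchFrom (k + 1) remaining (min upper (pyIsqrt remaining)).toNat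
  termination_by k _ _ => (k, 0)

  def searchFrom (k : Nat) (remaining : Int) : Nat → Option (List Int)
    | 0 =>
        match search k (remaining - 0 * 0) 0 with
        | some rest => some ((0 : Int) :: rest)
        | none => none
    | i + 1 =>
        match search k (remaining - ((i : Int) + 1) * ((i : Int) + 1)) ((i : Int) + 1) with
        | some rest => some (((i : Int) + 1) :: rest)
        | none => searchFrom k remaining i
  termination_by i => (k, i + 1)
end

def four_squares_alt (n : Int) : Option (Int × Int × Int × Int) :=
  if n < 0 then none
  else
    match search 4 n (pyIsqrt n) with
    | some [a, b, c, d] => some (a, b, c, d)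
    | _ => none

-- ===== PRECONDITION & SPEC =====
def Spec_four_squares (n : Int) (out : Option (Int × Int × Int × Int)) : Prop := out = four_squares_alt n
instance (n : Int) (out : Option (Int × Int × Int × Int)) : Decidable (Spec_four_squares n out) := by unfold Spec_four_squares; infer_instance

-- ===== CLAIM (what is proved, stated in full; the proofs are below) =====
def Claim_equal_four_squares : Prop := ∀ (n : Int), Dom_four_squares n → Spec_four_squares n (four_squares n)

-- ===== LEMMAS AND PROOFS =====

theorem pyIsqrt_of_neg {x : Int} (h : x < 0) : pyIsqrt x = 0 := by
  unfold pyIsqrt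
  rw [Int.toNat_of_nonpos (le_of_lt h)]
  simp

theorem search_one_of_neg {r : Int} (h : r < 0) (u : Int) : search 1 r u = none := by
  unfold search
  rw [pyIsqrt_of_neg h]
  simp
  omega

theorem searchFrom_one (r2 : Int) (c : Nat) :
    searchFrom 1 r2 c = (loopC r2 c).map (fun p => [p.1, p.2]) := by
  induction c with
  | zero =>
      unfold searchFrom loopC
      by_cases h : r2 - (0 : Int) * 0 < 0
      · rw [search_one_of_neg h]
        simp only [h, if_pos, Option.map_none]
      · unfold search
        split_ifs with hd
        · simp
        · simp
  | succ c ih =>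
      unfold searchFrom loopC
      by_cases h : r2 - ((c : Int) + 1) * ((c : Int) + 1) < 0
      · rw [search_one_of_neg h]
        simpa [h] using ih
      · unfold search
        split_ifs with hd
        · simp
        · simpa [h, hd] using ih

theorem search_two (r2 b : Int) (hb : 0 ≤ b) :
    search 2 r2 b =
      (if r2 < 0 then none else loopC r2 (min b (pyIsqrt r2)).toNat).map
        (fun p => [p.1, p.2]) := by
  unfold search
  by_cases h : r2 < 0
  · rw [pyIsqrt_of_neg h]
    rw [show (min b (0 : Int)).toNat = 0 by omega]
    rw [searchFrom_one]
    unfold loopC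
    simp [h]
  · rw [searchFrom_one]
    simp [h]

theorem searchFrom_two (r1 : Int) (b : Nat) :
    searchFrom 2 r1 b = (loopB r1 b).map (fun p => [p.1, p.2.1, p.2.2]) := by
  induction b with
  | zero =>
      unfold searchFrom loopB
      rw [search_two _ _ le_rfl]
      by_cases h : r1 - (0 : Int) * 0 < 0
      · simp only [zero_mul, sub_zero] at h ⊢
        simp [h]
      · simp only [zero_mul, sub_zero] at h ⊢
        simp only [h, if_false]
        cases hc : loopC r1 (min (0 : Int) (pyIsqrt r1)).toNat with
        | none => simp
        | some p => cases p with | mk c d => simp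
  | succ b ih =>
      unfold searchFrom loopB
      rw [search_two _ _ (by positivity)]
      by_cases h : r1 - ((b : Int) + 1) * ((b : Int) + 1) < 0
      · simpa [h] using ih
      · simp only [h, if_false]
        cases hc : loopC (r1 - ((b : Int) + 1) * ((b : Int) + 1)) (min ((b : Int) + 1) (pyIsqrt (r1 - ((b : Int) + 1) * ((b : Int) + 1)))).toNat with
        | none => simpa [hc] using ih
        | some p => cases p with | mk c d => simp

theorem search_three (r1 a : Int) (ha : 0 ≤ a) :
    search 3 r1 a =
      (if r1 < 0 then none else loopB r1 (min a (pyIsqrt r1)).toNat).map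
        (fun p => [p.1, p.2.1, p.2.2]) := by
  unfold search
  by_cases h : r1 < 0
  · rw [pyIsqrt_of_neg h]
    rw [show (min a (0 : Int)).toNat = 0 by omega]
    rw [searchFrom_two]
    unfold loopB
    simp [h]
  · rw [searchFrom_two]
    simp [h]

theorem searchFrom_three (n : Int) (a : Nat) :
    searchFrom 3 n a = (loopA n a).map (fun p => [p.1, p.2.1, p.2.2.1, p.2.2.2]) := by
  induction a with
  | zero =>
      unfold searchFrom loopA
      rw [search_three _ _ le_rfl]
      by_cases h : n - (0 : Int) * 0 < 0
      · simp only [zero_mul, sub_zero] at h ⊢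
        simp [h]
      · simp only [zero_mul, sub_zero] at h ⊢
        simp only [h, if_false]
        cases hb : loopB n (min (0 : Int) (pyIsqrt n)).toNat with
        | none => simp
        | some p => obtain ⟨b, c, d⟩ := p; simp
  | succ a ih =>
      unfold searchFrom loopA
      rw [search_three _ _ (by positivity)]
      by_cases h : n - ((a : Int) + 1) * ((a : Int) + 1) < 0
      · simpa [h] using ih
      · simp only [h, if_false]
        cases hb : loopB (n - ((a : Int) + 1) * ((a : Int) + 1)) (min ((a : Int) + 1) (pyIsqrt (n - ((a : Int) + 1) * ((a : Int) + 1)))).toNat with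
        | none => simpa [hb] using ih
        | some p => obtain ⟨b, c, d⟩ := p; simp

theorem search_four (n : Int) :
    search 4 n (pyIsqrt n) = (loopA n (pyIsqrt n).toNat).map (fun p => [p.1, p.2.1, p.2.2.1, p.2.2.2]) := by
  unfold search
  rw [min_self, searchFrom_three]

-- ===== VERDICT (by name: the statement is the Claim_ definition above) =====
theorem four_squares_spec : Claim_equal_four_squares := by
  intro n _
  unfold Spec_four_squares four_squares four_squares_alt
  by_cases h : n < 0
  · simp [h]
  · rw [if_neg h, if_neg h, search_four]
    cases ho : loopA n (pyIsqrt n).toNat with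
    | none => simp
    | some p => obtain ⟨a, b, c, d⟩ := p; simp
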